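-- pv_equiv track=rewrite | github.com/AbhiramVSA/Luma | src/controllers/longform_scenes.py | _map_silence_to_targets
-- ===== SOURCE A (Python) =====
-- SPLIT_SILENCE_MAX_OFFSET_MS = 1200
--
-- def _map_silence_to_targets(
--     target_points: list[int],
--     silence_midpoints: list[int],
--     total_ms: int,
-- ) -> list[int]:
--     if not target_points:
--         return []
--
--     available = sorted(point for point in silence_midpoints if 0 < point < total_ms)
--     chosen_points: list[int] = []
--
--     for target in target_points:
--         best_index: int | None = None
--         best_point: int | None = None
--         best_delta: int | None = None
--
--         for index, point in enumerate(available):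
--             delta = abs(point - target)
--             if best_delta is None or delta < best_delta:
--                 best_delta = delta
--                 best_point = point
--                 best_index = index
--             if delta <= 80:  # perfect match, stop searching
--                 break
--
--         if (
--             best_point is not None
--             and best_delta is not None
--             and best_delta <= SPLIT_SILENCE_MAX_OFFSET_MS
--         ):
--             chosen = best_point
--             del available[best_index]  # type: ignore[arg-type]
--         else:
--             chosen = target
--
--         if chosen_points and chosen <= chosen_points[-1]:
--             chosen = min(max(chosen, chosen_points[-1] + 1), total_ms - 1)
--
--         chosen_points.append(chosen)
--
--     return chosen_points
-- ===== SOURCE B (Python) =====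
-- SPLIT_SILENCE_MAX_OFFSET_MS = 1200
--
--
-- def _bisect_left(a, x):
--     # textbook bisect_left (stdlib bisect is not imported by the original module)
--     lo = 0
--     hi = len(a)
--     while lo < hi:
--         mid = (lo + hi) // 2
--         if a[mid] < x:
--             lo = mid + 1
--         else:
--             hi = mid
--     return lo
--
--
-- def _map_silence_to_targets(
--     target_points: list[int],
--     silence_midpoints: list[int],
--     total_ms: int,
-- ) -> list[int]:
--     # Binary search on the sorted pool instead of a linear best-scan per target:
--     # first point >= target-80 decides the "perfect match" case; otherwise the
--     # two neighbours of the insertion point are the only nearest candidates.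
--     available = sorted(p for p in silence_midpoints if 0 < p < total_ms)
--     chosen_points: list[int] = []
--     for target in target_points:
--         i = _bisect_left(available, target - 80)
--         if i < len(available) and available[i] <= target + 80:
--             chosen = available.pop(i)
--         else:
--             j = _bisect_left(available, target)
--             k = -1
--             if j < len(available):
--                 k = j
--             if j > 0 and (k < 0 or target - available[j - 1] <= available[k] - target):
--                 k = j - 1
--             if k >= 0 and abs(available[k] - target) <= SPLIT_SILENCE_MAX_OFFSET_MS:
--                 chosen = available.pop(k)
--             else:
--                 chosen = target
--         if chosen_points and chosen <= chosen_points[-1]: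
--             chosen = min(max(chosen, chosen_points[-1] + 1), total_ms - 1)
--         chosen_points.append(chosen)
--     return chosen_points
-- ===== Notes on version B (the rewrite author's own statement) =====
-- stated objective: alternative
-- what changed: B replaces A's per-target early-break linear scan of the sorted pool by binary search: the first point >= target-80 settles the within-80 case, otherwise only the two neighbours of target's insertion point are compared as nearest candidates.
import Mathlib
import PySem

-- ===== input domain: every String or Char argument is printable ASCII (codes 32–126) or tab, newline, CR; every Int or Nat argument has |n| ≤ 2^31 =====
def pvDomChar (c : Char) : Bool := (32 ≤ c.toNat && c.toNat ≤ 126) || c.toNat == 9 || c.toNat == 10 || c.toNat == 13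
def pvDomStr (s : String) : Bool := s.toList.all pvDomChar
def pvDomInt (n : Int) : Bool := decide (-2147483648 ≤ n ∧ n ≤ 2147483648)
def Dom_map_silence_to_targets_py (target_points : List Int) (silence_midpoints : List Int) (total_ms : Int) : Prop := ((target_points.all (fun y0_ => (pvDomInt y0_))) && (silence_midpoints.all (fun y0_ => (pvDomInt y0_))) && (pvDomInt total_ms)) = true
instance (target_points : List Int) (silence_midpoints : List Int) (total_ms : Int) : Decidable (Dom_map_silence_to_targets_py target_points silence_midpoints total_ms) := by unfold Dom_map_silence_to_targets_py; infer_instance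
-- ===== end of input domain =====

-- B replaces A's early-break linear scan per target by binary search on the sorted pool
-- (first point >= target-80, else the two neighbours of target's insertion point); objective: alternative.

def SPLIT_SILENCE_MAX_OFFSET_MS : Int := 1200

-- shared by both ports: the monotonic clamp line, identical in both Python sources
def pvClamp (chosen_points : List Int) (total_ms chosen : Int) : Int :=
  match chosen_points.getLast? with
  | some last => if chosen ≤ last then min (max chosen (last + 1)) (total_ms - 1) else chosen
  | none => chosen

-- ===== PORT A =====
-- the inner 'for index, point in enumerate(available)' loop with its early break
def pvScanA (target : Int) : List Int → Nat → Option Nat × Option Int × Option Int → Option Nat × Option Int × Option Int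
  | [], _, st => st
  | point :: rest, index, (bi, bp, bd) =>
    let delta := |point - target|
    let upd : Bool := match bd with
      | none => true
      | some d => decide (delta < d)
    let st' := if upd then (some index, some point, some delta) else (bi, bp, bd)
    if delta ≤ 80 then st' else pvScanA target rest (index + 1) st'

-- one iteration of the outer 'for target in target_points' loop; state = (available, chosen_points)
def pvStepA (total_ms : Int) (st : List Int × List Int) (target : Int) : List Int × List Int :=
  let r := pvScanA target st.1 0 (none, none, none)
  let sel : Int × List Int :=
    match r.2.1, r.2.2 with
    | some p, some d =>
      if d ≤ SPLIT_SILENCE_MAX_OFFSET_MS then (p, st.1.eraseIdx (r.1.getD 0)) else (target, st.1)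
    | _, _ => (target, st.1)
  (sel.2, st.2 ++ [pvClamp st.2 total_ms sel.1])

def map_silence_to_targets_py (target_points : List Int) (silence_midpoints : List Int) (total_ms : Int) : List Int :=
  if target_points = [] then []
  else
    let available := PySem.List.sorted (silence_midpoints.filter (fun p => decide (0 < p ∧ p < total_ms))) (fun x => x) false
    (target_points.foldl (pvStepA total_ms) (available, [])).2

-- ===== PORT B =====
-- _bisect_left in Source B is the textbook bisect_left loop; it is exactly PySem.List.bisectLeft
-- per-target choice on the sorted pool: the first point >= target-80 if it is <= target+80,
-- else the better of the two neighbours of the insertion point of target, if within 1200ms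
def pvChooseB (available : List Int) (target : Int) : Int × List Int :=
  let i := PySem.List.bisectLeft available (target - 80)
  if i < available.length ∧ available.getD i 0 ≤ target + 80 then
    match PySem.List.pop? available (i : Int) with
    | some r => r
    | none => (target, available)  -- unreachable: i < available.length
  else
    let j := PySem.List.bisectLeft available target
    let k0 : Int := if j < available.length then (j : Int) else -1
    let k : Int :=
      if 0 < j ∧ (k0 < 0 ∨ target - available.getD (j - 1) 0 ≤ available.getD k0.toNat 0 - target)
      then (j : Int) - 1 else k0
    if 0 ≤ k ∧ |available.getD k.toNat 0 - target| ≤ SPLIT_SILENCE_MAX_OFFSET_MS then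
      match PySem.List.pop? available k with
      | some r => r
      | none => (target, available)  -- unreachable: 0 ≤ k < available.length
    else (target, available)

def map_silence_to_targets_py_alt (target_points : List Int) (silence_midpoints : List Int) (total_ms : Int) : List Int :=
  let available := PySem.List.sorted (silence_midpoints.filter (fun p => decide (0 < p ∧ p < total_ms))) (fun x => x) false
  (target_points.foldl
    (fun st target =>
      let sel := pvChooseB st.1 target
      (sel.2, st.2 ++ [pvClamp st.2 total_ms sel.1]))
    (available, [])).2

-- ===== PRECONDITION & SPEC =====
def Spec_map_silence_to_targets_py (target_points : List Int) (silence_midpoints : List Int) (total_ms : Int) (out : List Int) : Prop := out = map_silence_to_targets_py_alt target_points silence_midpoints total_ms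
instance (target_points : List Int) (silence_midpoints : List Int) (total_ms : Int) (out : List Int) : Decidable (Spec_map_silence_to_targets_py target_points silence_midpoints total_ms out) := by unfold Spec_map_silence_to_targets_py; infer_instance

-- ===== CLAIM (what is proved, stated in full; the proofs are below) =====
def Claim_equal_map_silence_to_targets_py : Prop := ∀ (target_points : List Int) (silence_midpoints : List Int) (total_ms : Int), Dom_map_silence_to_targets_py target_points silence_midpoints total_ms → Spec_map_silence_to_targets_py target_points silence_midpoints total_ms (map_silence_to_targets_py target_points silence_midpoints total_ms)

-- ===== LEMMAS AND PROOFS =====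

-- 'q is at least as good as y' in A's scan order: strictly smaller distance, or equal distance and not later
def pvLexLE (t q y : Int) : Prop := |q - t| < |y - t| ∨ (|q - t| = |y - t| ∧ q ≤ y)

theorem pvLexLE_refl (t q : Int) : pvLexLE t q q := Or.inr ⟨rfl, le_refl q⟩

theorem pvLexLE_trans {t a b c : Int} (h1 : pvLexLE t a b) (h2 : pvLexLE t b c) : pvLexLE t a c := by
  rcases h1 with h1 | ⟨h1, h1'⟩ <;> rcases h2 with h2 | ⟨h2, h2'⟩
  · exact Or.inl (by omega)
  · exact Or.inl (by omega)
  · exact Or.inl (by omega)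
  · exact Or.inr ⟨by omega, by omega⟩

theorem pvLexLE_antisymm {t a b : Int} (h1 : pvLexLE t a b) (h2 : pvLexLE t b a) : a = b := by
  rcases h1 with h1 | ⟨h1, h1'⟩ <;> rcases h2 with h2 | ⟨h2, h2'⟩ <;> omega

-- a list permutes with any hole-punched version of itself re-fronted by the removed element
theorem pv_perm_cons_eraseIdx {l : List Int} {j : Nat} (hj : j < l.length) :
    l.Perm (l[j] :: l.eraseIdx j) := by
  induction l generalizing j with
  | nil => simp at hj
  | cons x tl ih =>
    cases j with
    | zero => simp
    | succ j =>
      simp only [List.length_cons, Nat.succ_lt_succ_iff] at hj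
      have h1 : (x :: tl).Perm (x :: tl[j] :: tl.eraseIdx j) := (ih hj).cons x
      simpa using h1.trans (List.Perm.swap _ _ _)

theorem pv_eraseIdx_perm_erase {l : List Int} {j : Nat} {q : Int} (hj : j < l.length)
    (hq : l[j] = q) : (l.eraseIdx j).Perm (l.erase q) := by
  have h1 : l.Perm (q :: l.eraseIdx j) := hq ▸ pv_perm_cons_eraseIdx hj
  have hmem : q ∈ l := hq ▸ l.getElem_mem hj
  have h2 : l.Perm (q :: l.erase q) := List.perm_cons_erase hmem
  exact (h1.symm.trans h2).cons_inv

-- evaluation shapes of one inner-loop iteration of A's scan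
theorem pvScanA_cons_some (t p : Int) (rest : List Int) (idx i : Nat) (b d : Int) :
    pvScanA t (p :: rest) idx (some i, some b, some d) =
      (let st' := if |p - t| < d then (some idx, some p, some (|p - t|)) else (some i, some b, some d)
       if |p - t| ≤ 80 then st' else pvScanA t rest (idx + 1) st') := by
  simp only [pvScanA]
  by_cases h : |p - t| < d <;> simp [h]

theorem pvScanA_cons_none (t p : Int) (rest : List Int) (idx : Nat) :
    pvScanA t (p :: rest) idx (none, none, none) =
      (if |p - t| ≤ 80 then (some idx, some p, some (|p - t|))
       else pvScanA t rest (idx + 1) (some idx, some p, some (|p - t|))) := by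
  simp only [pvScanA, if_true]

-- characterization of A's inner scan, continuing from an accumulated best (i, b) with |b-t| > 80
theorem pvScanA_go (t : Int) (l : List Int) : ∀ (idx i : Nat) (b : Int),
    l.Pairwise (· ≤ ·) → (∀ y ∈ l, b ≤ y) → 80 < |b - t| →
    ∃ j q, pvScanA t l idx (some i, some b, some (|b - t|)) = (some j, some q, some (|q - t|)) ∧
      ((j = i ∧ q = b) ∨ ∃ k, ∃ _ : k < l.length, j = idx + k ∧ l[k] = q) ∧
      (l.filter (fun y => decide (|y - t| ≤ 80)) ≠ [] →
        |q - t| ≤ 80 ∧ q ∈ l ∧ ∀ y ∈ l, |y - t| ≤ 80 → q ≤ y) ∧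
      (l.filter (fun y => decide (|y - t| ≤ 80)) = [] →
        80 < |q - t| ∧ (q = b ∨ q ∈ l) ∧ ∀ y, (y = b ∨ y ∈ l) → pvLexLE t q y) := by
  induction l with
  | nil =>
    intro idx i b _ _ hb
    refine ⟨i, b, rfl, Or.inl ⟨rfl, rfl⟩, by simp, fun _ => ⟨hb, Or.inl rfl, fun y hy => ?_⟩⟩
    rcases hy with rfl | h
    · exact pvLexLE_refl t y
    · simp at h
  | cons p rest ih =>
    intro idx i b hpw hbl hb
    have hple : ∀ y ∈ rest, p ≤ y := fun y hy => (List.pairwise_cons.mp hpw).1 y hy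
    have hpw' : rest.Pairwise (· ≤ ·) := (List.pairwise_cons.mp hpw).2
    have hbl' : ∀ y ∈ rest, b ≤ y := fun y hy => hbl y (List.mem_cons_of_mem _ hy)
    rw [pvScanA_cons_some]
    by_cases hbr : |p - t| ≤ 80
    · -- break immediately; best was just updated to p since |p-t| ≤ 80 < |b-t|
      rw [if_pos (show |p - t| < |b - t| by omega), if_pos hbr]
      refine ⟨idx, p, rfl, Or.inr ⟨0, by simp, by omega, rfl⟩, fun _ => ⟨hbr, List.mem_cons_self, ?_⟩, fun hemp => ?_⟩
      · intro y hy _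
        rcases List.mem_cons.mp hy with rfl | hy
        · exact le_refl y
        · exact hple y hy
      · exfalso
        have : p ∈ (p :: rest).filter (fun y => decide (|y - t| ≤ 80)) := by
          simp [List.mem_filter, hbr]
        rw [hemp] at this; simp at this
    · have hfilter : (p :: rest).filter (fun y => decide (|y - t| ≤ 80))
          = rest.filter (fun y => decide (|y - t| ≤ 80)) := by
        simp [hbr]
      rw [if_neg hbr]
      by_cases hc : |p - t| < |b - t|
      · -- best becomes (idx, p)
        rw [if_pos hc]
        obtain ⟨j, q, hq, hidx, hW, hN⟩ := ih (idx + 1) idx p hpw' hple (by omega)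
        refine ⟨j, q, hq, ?_, ?_, ?_⟩
        · rcases hidx with ⟨rfl, rfl⟩ | ⟨k, hk, rfl, rfl⟩
          · exact Or.inr ⟨0, by simp, by omega, rfl⟩
          · exact Or.inr ⟨k + 1, by simpa using Nat.succ_lt_succ hk, by omega, by simp⟩
        · rw [hfilter]
          intro hne
          obtain ⟨h1, h2, h3⟩ := hW hne
          refine ⟨h1, List.mem_cons_of_mem _ h2, fun y hy hy80 => ?_⟩
          rcases List.mem_cons.mp hy with rfl | hy
          · omega
          · exact h3 y hy hy80
        · rw [hfilter]
          intro hemp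
          obtain ⟨h1, h2, h3⟩ := hN hemp
          have hqp : pvLexLE t q p := h3 p (Or.inl rfl)
          refine ⟨h1, ?_, fun y hy => ?_⟩
          · rcases h2 with rfl | h2
            · exact Or.inr List.mem_cons_self
            · exact Or.inr (List.mem_cons_of_mem _ h2)
          · rcases hy with rfl | hy
            · exact pvLexLE_trans hqp (Or.inl hc)
            · rcases List.mem_cons.mp hy with rfl | hy
              · exact hqp
              · exact h3 y (Or.inr hy)
      · -- best stays (i, b)
        rw [if_neg hc]
        obtain ⟨j, q, hq, hidx, hW, hN⟩ := ih (idx + 1) i b hpw' hbl' hb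
        refine ⟨j, q, hq, ?_, ?_, ?_⟩
        · rcases hidx with ⟨rfl, rfl⟩ | ⟨k, hk, rfl, rfl⟩
          · exact Or.inl ⟨rfl, rfl⟩
          · exact Or.inr ⟨k + 1, by simpa using Nat.succ_lt_succ hk, by omega, by simp⟩
        · rw [hfilter]
          intro hne
          obtain ⟨h1, h2, h3⟩ := hW hne
          refine ⟨h1, List.mem_cons_of_mem _ h2, fun y hy hy80 => ?_⟩
          rcases List.mem_cons.mp hy with rfl | hy
          · omega
          · exact h3 y hy hy80
        · rw [hfilter]
          intro hemp
          obtain ⟨h1, h2, h3⟩ := hN hemp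
          have hqb : pvLexLE t q b := h3 b (Or.inl rfl)
          have hbp : pvLexLE t b p := by
            by_cases hlt : |b - t| < |p - t|
            · exact Or.inl hlt
            · exact Or.inr ⟨by omega, hbl p List.mem_cons_self⟩
          refine ⟨h1, ?_, fun y hy => ?_⟩
          · rcases h2 with rfl | h2
            · exact Or.inl rfl
            · exact Or.inr (List.mem_cons_of_mem _ h2)
          · rcases hy with rfl | hy
            · exact hqb
            · rcases List.mem_cons.mp hy with rfl | hy
              · exact pvLexLE_trans hqb hbp
              · exact h3 y (Or.inr hy)

-- characterization of A's inner scan from the initial (None, None, None) state, on a sorted list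
theorem pvScanA_spec (t : Int) (F : List Int) (hs : F.Pairwise (· ≤ ·)) (hne : F ≠ []) :
    ∃ j q, pvScanA t F 0 (none, none, none) = (some j, some q, some (|q - t|)) ∧
      (∃ _ : j < F.length, F[j] = q) ∧
      (F.filter (fun y => decide (|y - t| ≤ 80)) ≠ [] →
        |q - t| ≤ 80 ∧ ∀ y ∈ F, |y - t| ≤ 80 → q ≤ y) ∧
      (F.filter (fun y => decide (|y - t| ≤ 80)) = [] →
        80 < |q - t| ∧ ∀ y ∈ F, pvLexLE t q y) := by
  cases F with
  | nil => exact absurd rfl hne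
  | cons p rest =>
    have hple : ∀ y ∈ rest, p ≤ y := fun y hy => (List.pairwise_cons.mp hs).1 y hy
    have hpw' : rest.Pairwise (· ≤ ·) := (List.pairwise_cons.mp hs).2
    rw [pvScanA_cons_none]
    by_cases hbr : |p - t| ≤ 80
    · rw [if_pos hbr]
      refine ⟨0, p, rfl, ⟨by simp, rfl⟩, fun _ => ⟨hbr, fun y hy _ => ?_⟩, fun hemp => ?_⟩
      · rcases List.mem_cons.mp hy with rfl | hy
        · exact le_refl y
        · exact hple y hy
      · exfalso
        have : p ∈ (p :: rest).filter (fun y => decide (|y - t| ≤ 80)) := by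
          simp [List.mem_filter, hbr]
        rw [hemp] at this; simp at this
    · have hfilter : (p :: rest).filter (fun y => decide (|y - t| ≤ 80))
          = rest.filter (fun y => decide (|y - t| ≤ 80)) := by
        simp [hbr]
      rw [if_neg hbr]
      obtain ⟨j, q, hq, hidx, hW, hN⟩ := pvScanA_go t rest 1 0 p hpw' hple (by omega)
      refine ⟨j, q, hq, ?_, ?_, ?_⟩
      · rcases hidx with ⟨rfl, rfl⟩ | ⟨k, hk, rfl, rfl⟩
        · exact ⟨by simp, rfl⟩
        · exact ⟨by simp; omega, by simp [Nat.add_comm 1 k]⟩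
      · rw [hfilter]
        intro hne'
        obtain ⟨h1, _, h3⟩ := hW hne'
        refine ⟨h1, fun y hy hy80 => ?_⟩
        rcases List.mem_cons.mp hy with rfl | hy
        · omega
        · exact h3 y hy hy80
      · rw [hfilter]
        intro hemp
        obtain ⟨h1, _, h3⟩ := hN hemp
        refine ⟨h1, fun y hy => ?_⟩
        rcases List.mem_cons.mp hy with rfl | hy
        · exact h3 y (Or.inl rfl)
        · exact h3 y (Or.inr hy)

-- two sorted lists with the same multiset of elements are equal
theorem pv_sorted_perm_eq {l₁ l₂ : List Int} (hp : l₁.Perm l₂)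
    (h₁ : l₁.Pairwise (· ≤ ·)) (h₂ : l₂.Pairwise (· ≤ ·)) : l₁ = l₂ :=
  List.Perm.eq_of_pairwise (fun _ _ _ _ hab hba => le_antisymm hab hba) h₁ h₂ hp

-- one outer-loop step on the shared sorted pool: same appended choice, same remaining pool
theorem pvStep_eq (t total : Int) (F cp : List Int) (hs : F.Pairwise (· ≤ ·)) :
    (pvStepA total (F, cp) t).2 = cp ++ [pvClamp cp total (pvChooseB F t).1] ∧
    (pvStepA total (F, cp) t).1.Pairwise (· ≤ ·) ∧
    (pvStepA total (F, cp) t).1 = (pvChooseB F t).2 := by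
  by_cases hF : F = []
  · subst hF
    exact ⟨rfl, List.Pairwise.nil, rfl⟩
  · obtain ⟨j, q, hscan, ⟨hj, hFj⟩, hW, hN⟩ := pvScanA_spec t F hs hF
    have hlen : 0 < F.length := List.length_pos_iff.mpr hF
    have hmono : ∀ {a b : Nat} (ha : a < F.length) (hb : b < F.length), a ≤ b → F[a] ≤ F[b] := by
      intro a b ha hb hab
      rcases Nat.lt_or_eq_of_le hab with h | h
      · exact List.pairwise_iff_getElem.mp hs a b ha hb h
      · subst h; exact le_refl _
    have hA : pvStepA total (F, cp) t =
        if |q - t| ≤ SPLIT_SILENCE_MAX_OFFSET_MS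
        then (F.eraseIdx j, cp ++ [pvClamp cp total q])
        else (F, cp ++ [pvClamp cp total t]) := by
      simp only [pvStepA, hscan]
      by_cases h1200 : |q - t| ≤ SPLIT_SILENCE_MAX_OFFSET_MS <;> simp [h1200]
    obtain ⟨hi_le, hi_lt, hi_ge⟩ := PySem.List.bisectLeft_spec F (t - 80) hs
    by_cases hWne : F.filter (fun y => decide (|y - t| ≤ 80)) ≠ []
    · -- a point within 80ms exists: A picks the least such, B pops the first index ≥ t-80
      obtain ⟨h80, hmin⟩ := hW hWne
      have hij : PySem.List.bisectLeft F (t - 80) ≤ j := by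
        by_contra hc
        have := hi_lt j hj (by omega)
        rw [hFj] at this
        rw [abs_le] at h80
        omega
      have hi : PySem.List.bisectLeft F (t - 80) < F.length := lt_of_le_of_lt hij hj
      have hFi_ge : t - 80 ≤ F[PySem.List.bisectLeft F (t - 80)] := by
        have := hi_ge _ hi (le_refl _)
        omega
      have hFi_le_q : F[PySem.List.bisectLeft F (t - 80)] ≤ q := hFj ▸ hmono hi hj hij
      have hFi80 : |F[PySem.List.bisectLeft F (t - 80)] - t| ≤ 80 := by
        rw [abs_le] at h80 ⊢
        omega
      have hFiq : F[PySem.List.bisectLeft F (t - 80)] = q := by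
        have h1 : q ≤ F[PySem.List.bisectLeft F (t - 80)] :=
          hmin _ (F.getElem_mem hi) hFi80
        omega
      have hcond : PySem.List.bisectLeft F (t - 80) < F.length ∧
          F.getD (PySem.List.bisectLeft F (t - 80)) 0 ≤ t + 80 := by
        refine ⟨hi, ?_⟩
        rw [List.getD_eq_getElem F 0 hi]
        rw [abs_le] at hFi80
        omega
      have hpop : PySem.List.pop? F ((PySem.List.bisectLeft F (t - 80) : Nat) : Int)
          = some (F[PySem.List.bisectLeft F (t - 80)], F.eraseIdx (PySem.List.bisectLeft F (t - 80))) :=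
        PySem.List.pop?_natCast F _ hi
      have hB : pvChooseB F t = (q, F.eraseIdx (PySem.List.bisectLeft F (t - 80))) := by
        simp only [pvChooseB]
        rw [if_pos hcond, hpop, hFiq]
      have hsortedj : (F.eraseIdx j).Pairwise (· ≤ ·) := hs.sublist (F.eraseIdx_sublist j)
      have hsortedi : (F.eraseIdx (PySem.List.bisectLeft F (t - 80))).Pairwise (· ≤ ·) :=
        hs.sublist (F.eraseIdx_sublist _)
      have herase : F.eraseIdx j = F.eraseIdx (PySem.List.bisectLeft F (t - 80)) :=
        pv_sorted_perm_eq
          ((pv_eraseIdx_perm_erase hj hFj).trans (pv_eraseIdx_perm_erase hi hFiq).symm)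
          hsortedj hsortedi
      rw [hA, if_pos (by unfold SPLIT_SILENCE_MAX_OFFSET_MS; omega), hB, herase]
      exact ⟨rfl, hsortedi, rfl⟩
    · -- no point within 80ms of the target
      rw [not_not] at hWne
      obtain ⟨h80q, hlex⟩ := hN hWne
      have hnotwithin : ∀ y ∈ F, ¬(|y - t| ≤ 80) := by
        intro y hy hc
        have : y ∈ F.filter (fun y => decide (|y - t| ≤ 80)) := by
          simp [List.mem_filter, hy, hc]
        rw [hWne] at this
        simp at this
      have hcond1 : ¬(PySem.List.bisectLeft F (t - 80) < F.length ∧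
          F.getD (PySem.List.bisectLeft F (t - 80)) 0 ≤ t + 80) := by
        rintro ⟨h1, h2⟩
        rw [List.getD_eq_getElem F 0 h1] at h2
        have h3 := hi_ge _ h1 (le_refl _)
        exact hnotwithin _ (F.getElem_mem h1) (by rw [abs_le]; omega)
      obtain ⟨hJ_le, hJ_lt, hJ_ge⟩ := PySem.List.bisectLeft_spec F t hs
      -- the candidate index B settles on, as a natural number, and the value there
      have main : ∃ kk : Nat, ∃ hkk : kk < F.length,
          ((if 0 < PySem.List.bisectLeft F t ∧
              ((if PySem.List.bisectLeft F t < F.length then ((PySem.List.bisectLeft F t : Nat) : Int) else -1) < 0 ∨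
                t - F.getD (PySem.List.bisectLeft F t - 1) 0 ≤
                  F.getD (if PySem.List.bisectLeft F t < F.length then ((PySem.List.bisectLeft F t : Nat) : Int) else -1).toNat 0 - t)
            then ((PySem.List.bisectLeft F t : Nat) : Int) - 1
            else (if PySem.List.bisectLeft F t < F.length then ((PySem.List.bisectLeft F t : Nat) : Int) else -1)) : Int)
            = (kk : Int) ∧ F[kk] = q := by
        have habs_lt : ∀ m (hm : m < F.length), m < PySem.List.bisectLeft F t → |F[m] - t| = t - F[m] := by
          intro m hm hmJ
          have := hJ_lt m hm hmJ
          rw [abs_of_neg (by omega)]; ring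
        have habs_ge : ∀ m (hm : m < F.length), PySem.List.bisectLeft F t ≤ m → |F[m] - t| = F[m] - t := by
          intro m hm hmJ
          have := hJ_ge m hm hmJ
          rw [abs_of_nonneg (by omega)]
        -- whichever candidate B picks is a lexicographic minimum, hence equals q
        have pick : ∀ kk : Nat, ∀ hkk : kk < F.length, (∀ y ∈ F, pvLexLE t F[kk] y) → F[kk] = q :=
          fun kk hkk hminv =>
            pvLexLE_antisymm (hminv q (hFj ▸ F.getElem_mem hj)) (hlex _ (F.getElem_mem hkk))
        by_cases hJlen : PySem.List.bisectLeft F t < F.length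
        · by_cases hJ0 : 0 < PySem.List.bisectLeft F t
          · -- both neighbours exist; B compares them
            have hJm1 : PySem.List.bisectLeft F t - 1 < F.length := by omega
            have hvJ : t ≤ F[PySem.List.bisectLeft F t] := hJ_ge _ hJlen (le_refl _)
            have hvJm1 : F[PySem.List.bisectLeft F t - 1] < t := hJ_lt _ hJm1 (by omega)
            by_cases hcmp : t - F.getD (PySem.List.bisectLeft F t - 1) 0 ≤
                F.getD ((if PySem.List.bisectLeft F t < F.length then ((PySem.List.bisectLeft F t : Nat) : Int) else -1)).toNat 0 - t
            · refine ⟨PySem.List.bisectLeft F t - 1, hJm1, ?_, ?_⟩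
              · rw [if_pos ⟨hJ0, Or.inr hcmp⟩]
                omega
              · rw [if_pos hJlen, List.getD_eq_getElem F 0 hJm1] at hcmp
                simp only [Int.toNat_natCast] at hcmp
                rw [List.getD_eq_getElem F 0 hJlen] at hcmp
                refine pick _ hJm1 ?_
                intro y hy
                obtain ⟨m, hm, rfl⟩ := List.mem_iff_getElem.mp hy
                by_cases hmJ : m < PySem.List.bisectLeft F t
                · have h1 := habs_lt _ hJm1 (by omega)
                  have h2 := habs_lt _ hm hmJ
                  have h3 : F[m] ≤ F[PySem.List.bisectLeft F t - 1] := hmono hm hJm1 (by omega)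
                  rcases eq_or_lt_of_le h3 with h4 | h4
                  · exact Or.inr ⟨by omega, by omega⟩
                  · exact Or.inl (by omega)
                · have h1 := habs_lt _ hJm1 (by omega)
                  have h2 := habs_ge _ hm (by omega)
                  have h3 : F[PySem.List.bisectLeft F t] ≤ F[m] := hmono hJlen hm (by omega)
                  rcases eq_or_lt_of_le (show |F[PySem.List.bisectLeft F t - 1] - t| ≤ |F[m] - t| by omega) with h4 | h4
                  · exact Or.inr ⟨h4, by omega⟩
                  · exact Or.inl h4
            · refine ⟨PySem.List.bisectLeft F t, hJlen, ?_, ?_⟩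
              · rw [if_neg (by
                    rintro ⟨-, hor⟩
                    rcases hor with hneg | hc
                    · rw [if_pos hJlen] at hneg; omega
                    · exact hcmp hc), if_pos hJlen]
              · rw [if_pos hJlen, List.getD_eq_getElem F 0 hJm1] at hcmp
                simp only [Int.toNat_natCast] at hcmp
                rw [List.getD_eq_getElem F 0 hJlen] at hcmp
                refine pick _ hJlen ?_
                intro y hy
                obtain ⟨m, hm, rfl⟩ := List.mem_iff_getElem.mp hy
                by_cases hmJ : m < PySem.List.bisectLeft F t
                · have h1 := habs_ge _ hJlen (le_refl _)
                  have h2 := habs_lt _ hm hmJ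
                  have h3 : F[m] ≤ F[PySem.List.bisectLeft F t - 1] := hmono hm hJm1 (by omega)
                  exact Or.inl (by omega)
                · have h1 := habs_ge _ hJlen (le_refl _)
                  have h2 := habs_ge _ hm (by omega)
                  have h3 : F[PySem.List.bisectLeft F t] ≤ F[m] := hmono hJlen hm (by omega)
                  rcases eq_or_lt_of_le (show |F[PySem.List.bisectLeft F t] - t| ≤ |F[m] - t| by omega) with h4 | h4
                  · exact Or.inr ⟨h4, by omega⟩
                  · exact Or.inl h4
          · -- insertion point at the front: the first element is the nearest
            have hJ0' : PySem.List.bisectLeft F t = 0 := by omega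
            refine ⟨0, hlen, ?_, ?_⟩
            · rw [if_neg (by rintro ⟨hc, -⟩; omega), if_pos hJlen]
              omega
            · refine pick _ hlen ?_
              intro y hy
              obtain ⟨m, hm, rfl⟩ := List.mem_iff_getElem.mp hy
              have h1 := habs_ge _ hlen (by omega)
              have h2 := habs_ge _ hm (by omega)
              have h3 : F[0] ≤ F[m] := hmono hlen hm (by omega)
              rcases eq_or_lt_of_le (show |F[0] - t| ≤ |F[m] - t| by omega) with h4 | h4
              · exact Or.inr ⟨h4, h3⟩
              · exact Or.inl h4
        · -- insertion point at the back: the last element is the nearest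
          have hJlen' : PySem.List.bisectLeft F t = F.length := by omega
          have hJ0 : 0 < PySem.List.bisectLeft F t := by omega
          have hJm1 : PySem.List.bisectLeft F t - 1 < F.length := by omega
          refine ⟨PySem.List.bisectLeft F t - 1, hJm1, ?_, ?_⟩
          · rw [if_pos ⟨hJ0, Or.inl (by rw [if_neg hJlen]; omega)⟩]
            omega
          · refine pick _ hJm1 ?_
            intro y hy
            obtain ⟨m, hm, rfl⟩ := List.mem_iff_getElem.mp hy
            have h1 := habs_lt _ hJm1 (by omega)
            have h2 := habs_lt _ hm (by omega)
            have h3 : F[m] ≤ F[PySem.List.bisectLeft F t - 1] := hmono hm hJm1 (by omega)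
            rcases eq_or_lt_of_le h3 with h4 | h4
            · exact Or.inr ⟨by omega, by omega⟩
            · exact Or.inl (by omega)
      obtain ⟨kk, hkk, hkksel, hkkq⟩ := main
      have hB : pvChooseB F t =
          if |q - t| ≤ SPLIT_SILENCE_MAX_OFFSET_MS
          then (q, F.eraseIdx kk)
          else (t, F) := by
        simp only [pvChooseB]
        rw [if_neg hcond1, hkksel]
        have hgd : F.getD ((kk : Int)).toNat 0 = q := by
          simp only [Int.toNat_natCast]
          rw [List.getD_eq_getElem F 0 hkk, hkkq]
        rw [hgd]
        by_cases h1200 : |q - t| ≤ SPLIT_SILENCE_MAX_OFFSET_MS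
        · rw [if_pos ⟨by omega, h1200⟩, if_pos h1200,
            show ((kk : Int)) = ((kk : Nat) : Int) from rfl,
            PySem.List.pop?_natCast F kk hkk, hkkq]
        · rw [if_neg (by rintro ⟨-, hc⟩; exact h1200 hc), if_neg h1200]
      by_cases h1200 : |q - t| ≤ SPLIT_SILENCE_MAX_OFFSET_MS
      · have hsortedj : (F.eraseIdx j).Pairwise (· ≤ ·) := hs.sublist (F.eraseIdx_sublist j)
        have hsortedk : (F.eraseIdx kk).Pairwise (· ≤ ·) := hs.sublist (F.eraseIdx_sublist kk)
        have herase : F.eraseIdx j = F.eraseIdx kk :=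
          pv_sorted_perm_eq
            ((pv_eraseIdx_perm_erase hj hFj).trans (pv_eraseIdx_perm_erase hkk hkkq).symm)
            hsortedj hsortedk
        rw [hA, if_pos h1200, hB, if_pos h1200, herase]
        exact ⟨rfl, hsortedk, rfl⟩
      · rw [hA, if_neg h1200, hB, if_neg h1200]
        exact ⟨rfl, hs, rfl⟩

theorem pvFold_eq (total : Int) (tps : List Int) : ∀ (F cp : List Int),
    F.Pairwise (· ≤ ·) →
    (tps.foldl (pvStepA total) (F, cp)).2 =
      (tps.foldl (fun st target =>
        let sel := pvChooseB st.1 target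
        (sel.2, st.2 ++ [pvClamp st.2 total sel.1])) (F, cp)).2 := by
  induction tps with
  | nil => intro F cp _; rfl
  | cons t rest ih =>
    intro F cp hs
    obtain ⟨h1, h2, h3⟩ := pvStep_eq t total F cp hs
    simp only [List.foldl_cons]
    rw [show pvStepA total (F, cp) t = ((pvStepA total (F, cp) t).1, (pvStepA total (F, cp) t).2) from rfl, h1, h3]
    exact ih _ _ (h3 ▸ h2)

-- ===== VERDICT (by name: the statement is the Claim_ definition above) =====
theorem map_silence_to_targets_py_spec : Claim_equal_map_silence_to_targets_py := by
  intro tp sm total _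
  unfold Spec_map_silence_to_targets_py map_silence_to_targets_py map_silence_to_targets_py_alt
  by_cases h : tp = []
  · subst h; rfl
  · simp only [if_neg h]
    exact pvFold_eq total tp _ [] (PySem.List.sorted_pairwise _ (fun x => x))
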